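-- pv_equiv track=rewrite | github.com/BeardMiner2000/workspace | scripts/session_memory.py | one_line_summary
-- ===== SOURCE A (Python) =====
-- def one_line_summary(messages):
--     user_msgs = [m['text'] for m in messages if m['role'] == 'user']
--     assistant_msgs = [m['text'] for m in messages if m['role'] == 'assistant']
--     first_user = user_msgs[0][:180] if user_msgs else ''
--     last_assistant = assistant_msgs[-1][:180] if assistant_msgs else ''
--     if first_user and last_assistant:
--         return f"Started with: {first_user} | Outcome: {last_assistant}"
--     return first_user or last_assistant or 'No text summary available.'
-- ===== SOURCE B (Python) =====
-- def one_line_summary(messages):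
--     first_user = None
--     last_assistant = None
--     for m in messages:
--         role = m['role']
--         if role == 'user':
--             t = m['text']
--             if first_user is None:
--                 first_user = t
--         elif role == 'assistant':
--             last_assistant = m['text']
--     fu = first_user[:180] if first_user is not None else ''
--     la = last_assistant[:180] if last_assistant is not None else ''
--     if fu and la:
--         return f"Started with: {fu} | Outcome: {la}"
--     return fu or la or 'No text summary available.'
-- ===== Notes on version B (the rewrite author's own statement) =====
-- stated objective: alternative
-- what changed: B replaces A's two full list comprehensions (all user texts, all assistant texts) with a single loop over messages that keeps only the first user text and last assistant text, then applies the same [:180] slicing and formatting.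
import Mathlib
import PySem

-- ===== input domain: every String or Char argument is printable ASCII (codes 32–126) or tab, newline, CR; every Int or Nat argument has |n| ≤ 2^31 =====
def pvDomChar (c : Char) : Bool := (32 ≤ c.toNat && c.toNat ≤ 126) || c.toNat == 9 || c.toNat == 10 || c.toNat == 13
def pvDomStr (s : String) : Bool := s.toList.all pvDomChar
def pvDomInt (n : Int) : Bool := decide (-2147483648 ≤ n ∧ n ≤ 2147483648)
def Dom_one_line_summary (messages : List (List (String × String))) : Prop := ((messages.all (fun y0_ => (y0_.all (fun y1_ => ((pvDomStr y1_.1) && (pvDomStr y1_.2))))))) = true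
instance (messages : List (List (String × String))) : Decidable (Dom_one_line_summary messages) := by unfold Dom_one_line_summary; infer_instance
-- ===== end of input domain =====

-- B is a single pass over messages keeping (first user text, last assistant text) instead of A's
-- two full list comprehensions; same return value everywhere A returns (objective: alternative).

-- ===== PORT A =====
def one_line_summary (messages : List (List (String × String))) : String :=
  let user_msgs := (messages.filter (fun m => (PySem.Dict.mk m).getD "role" "" == "user")).map
      (fun m => (PySem.Dict.mk m).getD "text" "")
  let assistant_msgs := (messages.filter (fun m => (PySem.Dict.mk m).getD "role" "" == "assistant")).map
      (fun m => (PySem.Dict.mk m).getD "text" "")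
  let first_user := match PySem.List.pyGet? user_msgs 0 with
    | some t => PySem.Str.slice t none (some 180)
    | none => ""
  let last_assistant := match PySem.List.pyGet? assistant_msgs (-1) with
    | some t => PySem.Str.slice t none (some 180)
    | none => ""
  if first_user ≠ "" ∧ last_assistant ≠ "" then
    "Started with: " ++ first_user ++ " | Outcome: " ++ last_assistant
  else if first_user ≠ "" then first_user
  else if last_assistant ≠ "" then last_assistant
  else "No text summary available."

-- ===== PORT B =====
def olsStep (s : Option String × Option String) (m : List (String × String)) :
    Option String × Option String :=
  let role := (PySem.Dict.mk m).getD "role" ""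
  if role == "user" then
    let t := (PySem.Dict.mk m).getD "text" ""
    (match s.1 with | none => some t | some x => some x, s.2)
  else if role == "assistant" then
    (s.1, some ((PySem.Dict.mk m).getD "text" ""))
  else s

def one_line_summary_alt (messages : List (List (String × String))) : String :=
  let st := messages.foldl olsStep (none, none)
  let fu := match st.1 with
    | some t => PySem.Str.slice t none (some 180)
    | none => ""
  let la := match st.2 with
    | some t => PySem.Str.slice t none (some 180)
    | none => ""
  if fu ≠ "" ∧ la ≠ "" then
    "Started with: " ++ fu ++ " | Outcome: " ++ la
  else if fu ≠ "" then fu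
  else if la ≠ "" then la
  else "No text summary available."

-- ===== PRECONDITION & SPEC =====
-- Pre_ excludes exactly the inputs on which A raises KeyError: a message without a 'role' key,
-- or a user/assistant message without a 'text' key.
def Pre_one_line_summary (messages : List (List (String × String))) : Prop :=
  ∀ m ∈ messages, ((PySem.Dict.mk m).get? "role").isSome ∧
    (((PySem.Dict.mk m).get? "role" = some "user" ∨ (PySem.Dict.mk m).get? "role" = some "assistant") →
      ((PySem.Dict.mk m).get? "text").isSome)
instance (messages : List (List (String × String))) : Decidable (Pre_one_line_summary messages) := by
  unfold Pre_one_line_summary; infer_instance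

def pvWitness_one_line_summary : (List (List (String × String))) :=
  [[("role", "user"), ("text", "hi")], [("role", "assistant"), ("text", "hello")]]

def Spec_one_line_summary (messages : List (List (String × String))) (out : String) : Prop := out = one_line_summary_alt messages
instance (messages : List (List (String × String))) (out : String) : Decidable (Spec_one_line_summary messages out) := by unfold Spec_one_line_summary; infer_instance

-- ===== CLAIM (what is proved, stated in full; the proofs are below) =====
def Claim_equal_one_line_summary : Prop := ∀ (messages : List (List (String × String))), Dom_one_line_summary messages → Pre_one_line_summary messages → Spec_one_line_summary messages (one_line_summary messages)

-- ===== LEMMAS AND PROOFS =====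

-- B's loop, run from any state, yields the first user text (unless already set) and the last assistant text.
lemma olsFold (msgs : List (List (String × String))) (s : Option String × Option String) :
    msgs.foldl olsStep s =
      (s.1.or (((msgs.filter (fun m => (PySem.Dict.mk m).getD "role" "" == "user")).map
          (fun m => (PySem.Dict.mk m).getD "text" "")).head?),
       (((msgs.filter (fun m => (PySem.Dict.mk m).getD "role" "" == "assistant")).map
          (fun m => (PySem.Dict.mk m).getD "text" "")).getLast?).or s.2) := by
  induction msgs generalizing s with
  | nil => simp
  | cons m rest ih =>
    simp only [List.foldl_cons, ih]
    by_cases hu : ((PySem.Dict.mk m).getD "role" "" == "user") = true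
    · have ha : ((PySem.Dict.mk m).getD "role" "" == "assistant") = false := by simp_all
      simp only [olsStep, hu, if_pos, List.filter_cons, ha, if_neg, Bool.false_eq_true,
        not_false_eq_true, List.map_cons]
      cases h1 : s.1 <;> simp
    · by_cases ha : ((PySem.Dict.mk m).getD "role" "" == "assistant") = true
      · simp only [olsStep, hu, ha, List.filter_cons, List.map_cons, if_neg, if_pos,
          Bool.false_eq_true, not_false_eq_true]
        have key : ∀ (l : List String) (x : String) (s2 : Option String),
            (l.getLast?).or (some x) = ((x :: l).getLast?).or s2 := by
          intro l x s2
          rw [List.getLast?_cons]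
          cases h : l.getLast? <;>
            simp [Option.or]
        simp only [Prod.mk.injEq]
        exact ⟨trivial, key _ _ _⟩
      · simp [olsStep, hu, ha]

-- ===== VERDICT (by name: the statement is the Claim_ definition above) =====
theorem one_line_summary_spec : Claim_equal_one_line_summary := by
  intro messages _ _
  unfold Spec_one_line_summary one_line_summary one_line_summary_alt
  rw [olsFold]
  simp only [PySem.List.pyGet?_zero, PySem.List.pyGet?_neg_one, Option.or_none, Option.none_or,
    List.head?_eq_getElem?]
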